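-- pv_equiv track=rewrite | github.com/shivamJerry2108064/PYTHON_IMP_Q | MOCK/WEEK6.py | vowely_count
-- ===== SOURCE A (Python) =====
-- def vowely_count(words:list)->int:
--     ''' Given a list of words find the number of vowely words from the list.
--     A word is vowely if
--     - it has all the vowels in it.
--     - the vowels occur in ascending order.
--
--     Arguments: words :list[str]   Return: int - number of vowely words'''
--
--     vowels = ['a','e','i','o','u']
--     count = 0
--
--     for word in words:
--         result = []
--         for i in range(len(word)):
--             if(word[i] in vowels):
--                 result.append(word[i])
--         if(result == vowels):           # if true : means words has all words in it and ordered in ascending order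
--             count += 1
--     return count
-- ===== SOURCE B (Python) =====
-- def vowely_count(words: list) -> int:
--     '''Count words whose vowels are exactly a,e,i,o,u in that order (single-pass state machine).'''
--     vowels = "aeiou"
--     count = 0
--     for word in words:
--         p = 0
--         ok = True
--         for ch in word:
--             if ch in vowels:
--                 if ok and p < 5 and vowels[p] == ch:
--                     p += 1
--                 else:
--                     ok = False
--         if ok and p == 5:
--             count += 1
--     return count
-- ===== Notes on version B (the rewrite author's own statement) =====
-- stated objective: alternative
-- what changed: Replaces building a per-word vowel list then comparing it with ['a','e','i','o','u'] by a single-pass state machine per word: a pointer into 'aeiou' and an early-failure flag, counting when the pointer reaches 5.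
import Mathlib
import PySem

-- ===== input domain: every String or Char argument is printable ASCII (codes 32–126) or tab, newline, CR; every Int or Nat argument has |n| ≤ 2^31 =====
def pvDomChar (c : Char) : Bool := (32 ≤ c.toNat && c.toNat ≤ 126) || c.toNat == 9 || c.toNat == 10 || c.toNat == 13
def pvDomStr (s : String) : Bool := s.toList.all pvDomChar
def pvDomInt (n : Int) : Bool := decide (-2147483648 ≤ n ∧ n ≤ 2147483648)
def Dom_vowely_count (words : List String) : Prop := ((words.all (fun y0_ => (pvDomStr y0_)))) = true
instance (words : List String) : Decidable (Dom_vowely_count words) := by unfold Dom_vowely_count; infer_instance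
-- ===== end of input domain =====

-- B replaces A's build-vowel-list-then-compare with a single-pass pointer/flag state machine per word (alternative decomposition, same cost).

-- ===== PORT A =====
def vowelsA : List Char := ['a', 'e', 'i', 'o', 'u']

def vowely_count (words : List String) : Int :=
  words.foldl (fun count word =>
    let cs := word.toList
    let result := (PySem.List.pyRange 0 (cs.length : Int) 1).foldl
      (fun res i =>
        if PySem.List.pyGetD cs i ' ' ∈ vowelsA then res ++ [PySem.List.pyGetD cs i ' '] else res) []
    if result = vowelsA then count + 1 else count) 0

-- ===== PORT B =====
def vowelsB : List Char := "aeiou".toList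

def stepB (s : Nat × Bool) (c : Char) : Nat × Bool :=
  if c ∈ vowelsB then
    (if s.2 ∧ s.1 < 5 ∧ vowelsB[s.1]? = some c then (s.1 + 1, s.2) else (s.1, false))
  else s

def vowely_count_alt (words : List String) : Int :=
  words.foldl (fun count word =>
    let st := word.toList.foldl stepB (0, true)
    if st.2 ∧ st.1 = 5 then count + 1 else count) 0

-- ===== PRECONDITION & SPEC =====
def Spec_vowely_count (words : List String) (out : Int) : Prop := out = vowely_count_alt words
instance (words : List String) (out : Int) : Decidable (Spec_vowely_count words out) := by unfold Spec_vowely_count; infer_instance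

-- ===== CLAIM (what is proved, stated in full; the proofs are below) =====
def Claim_equal_vowely_count : Prop := ∀ (words : List String), Dom_vowely_count words → Spec_vowely_count words (vowely_count words)

-- ===== LEMMAS AND PROOFS =====

-- once the flag is false it stays false
theorem stepB_false (l : List Char) (p : Nat) :
    (l.foldl stepB (p, false)).2 = false := by
  induction l generalizing p with
  | nil => rfl
  | cons c l ih =>
    simp only [List.foldl_cons, stepB]
    split
    · split
      · simp_all
      · exact ih p
    · exact ih p

-- the state machine accepts from pointer p (flag true) iff the remaining vowels are exactly vowels.drop p
theorem stepB_char (l : List Char) (p : Nat) (hp : p ≤ 5) :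
    (l.foldl stepB (p, true) = (5, true)) ↔ (l.filter (· ∈ vowelsB) = vowelsB.drop p) := by
  induction l generalizing p with
  | nil =>
    simp only [List.foldl_nil, List.filter_nil, Prod.mk.injEq, and_true]
    constructor
    · rintro rfl; rfl
    · intro h
      interval_cases p <;> simp_all [vowelsB]
  | cons c l ih =>
    simp only [List.foldl_cons, List.filter_cons]
    by_cases hv : c ∈ vowelsB
    · simp only [stepB, hv, if_true, decide_true]
      split_ifs with hcond
      · obtain ⟨-, hlt, hc⟩ := hcond
        rw [ih (p + 1) (by omega)]
        have hlen : p < vowelsB.length := by simpa [vowelsB] using hlt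
        have hcv : vowelsB[p] = c := by
          rw [List.getElem?_eq_getElem hlen] at hc
          exact Option.some.inj hc
        rw [List.drop_eq_getElem_cons hlen, hcv]
        simp
      · have hok : ¬ (p < 5 ∧ vowelsB[p]? = some c) := by simpa using hcond
        constructor
        · intro h
          have := stepB_false l p
          rw [h] at this; simp at this
        · intro h
          exfalso
          by_cases hlt : p < 5
          · have hlen : p < vowelsB.length := by simpa [vowelsB] using hlt
            rw [List.drop_eq_getElem_cons hlen] at h
            have hcv : c = vowelsB[p] := (List.cons_eq_cons.mp h).1
            exact hok ⟨hlt, by rw [List.getElem?_eq_getElem hlen, hcv]⟩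
          · have hp5 : p = 5 := by omega
            subst hp5
            simp [vowelsB] at h
    · simp only [stepB, hv, if_false, decide_false]
      exact ih p hp

-- per-word agreement: A's list-equality test equals B's accept condition
theorem word_agree (word : String) :
    ((PySem.List.pyRange 0 ((word.toList).length : Int) 1).foldl
      (fun res i =>
        if PySem.List.pyGetD word.toList i ' ' ∈ vowelsA then res ++ [PySem.List.pyGetD word.toList i ' '] else res) [] = vowelsA)
    = ((((word.toList.foldl stepB (0, true)).2 : Bool) = true) ∧ (word.toList.foldl stepB (0, true)).1 = 5) := by
  rw [PySem.List.foldl_pyRange_zero_pyGetD' word.toList ' '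
       (fun res c => if c ∈ vowelsA then res ++ [c] else res) []]
  rw [PySem.List.foldl_append_ite_eq_filter]
  have hAB : vowelsA = vowelsB := by decide
  have h := stepB_char word.toList 0 (by omega)
  simp only [List.drop_zero] at h
  simp only [List.nil_append, hAB]
  rw [eq_iff_iff]
  constructor
  · intro hf
    have : word.toList.foldl stepB (0, true) = (5, true) := h.mpr hf
    rw [this]; exact ⟨rfl, rfl⟩
  · rintro ⟨h2, h1⟩
    apply h.mp
    have hpair : word.toList.foldl stepB (0, true)
        = ((word.toList.foldl stepB (0, true)).1, (word.toList.foldl stepB (0, true)).2) := rfl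
    rw [hpair, h1, h2]

-- ===== VERDICT (by name: the statement is the Claim_ definition above) =====
theorem vowely_count_spec : Claim_equal_vowely_count := by
  intro words _
  unfold Spec_vowely_count vowely_count vowely_count_alt
  induction words using List.reverseRecOn with
  | nil => rfl
  | append_singleton ws w ih =>
    simp only [List.foldl_append, List.foldl_cons, List.foldl_nil]
    rw [ih (by unfold Dom_vowely_count at *; simp_all)]
    simp only [word_agree w]
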